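-- pv_equiv track=rewrite | github.com/NDC12345/Algorithm | Bài 12 4 số nguyên tố liên tiếp.py | find_consecutive_primes
-- ===== SOURCE A (Python) =====
-- def is_prime(n):
--     if n <= 1:
--         return False
--     for i in range(2, n):
--         if n % i == 0:
--             return False
--     return True
--
-- def find_consecutive_primes(n, num_primes):
--     sequences = []
--     primes = []
--     num = 2
--     while sum(primes) <= n:
--         if is_prime(num):
--             primes.append(num)
--             if len(primes) > num_primes:
--                 primes.pop(0)
--             if len(primes) == num_primes and is_prime(sum(primes)):
--                 sequences.append(primes.copy())
--         num += 1
--     return sequences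
-- ===== SOURCE B (Python) =====
-- def is_prime(n):
--     if n < 2:
--         return False
--     i = 2
--     while i * i <= n:
--         if n % i == 0:
--             return False
--         i += 1
--     return True
--
-- def find_consecutive_primes(n, num_primes):
--     # Phase 1: generate primes, maintaining only the running sum of the
--     # last num_primes of them; stop once that window sum exceeds n
--     # (the prime whose window first overshoots is still kept, like A's check).
--     primes = []
--     window_sum = 0
--     candidate = 2
--     while window_sum <= n:
--         if is_prime(candidate):
--             primes.append(candidate)
--             window_sum += candidate
--             if len(primes) > num_primes:
--                 window_sum -= primes[len(primes) - num_primes - 1]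
--         candidate += 1
--     # Phase 2: prefix sums give every window sum in O(1).
--     prefix = [0]
--     for p in primes:
--         prefix.append(prefix[-1] + p)
--     return [primes[k - num_primes:k]
--             for k in range(num_primes, len(primes) + 1)
--             if is_prime(prefix[k] - prefix[k - num_primes])]
-- ===== Notes on version B (the rewrite author's own statement) =====
-- stated objective: faster
-- what changed: B splits A's single interleaved pass into a generation phase that keeps only a running window sum (no repeated sum()) followed by a prefix-sum scan that reads every window sum in O(1), and replaces A's O(x) trial division with an O(sqrt x) one.
-- outside the precondition, e.g. on find_consecutive_primes(-1, -2): A returns [], B raises IndexError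
import Mathlib
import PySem

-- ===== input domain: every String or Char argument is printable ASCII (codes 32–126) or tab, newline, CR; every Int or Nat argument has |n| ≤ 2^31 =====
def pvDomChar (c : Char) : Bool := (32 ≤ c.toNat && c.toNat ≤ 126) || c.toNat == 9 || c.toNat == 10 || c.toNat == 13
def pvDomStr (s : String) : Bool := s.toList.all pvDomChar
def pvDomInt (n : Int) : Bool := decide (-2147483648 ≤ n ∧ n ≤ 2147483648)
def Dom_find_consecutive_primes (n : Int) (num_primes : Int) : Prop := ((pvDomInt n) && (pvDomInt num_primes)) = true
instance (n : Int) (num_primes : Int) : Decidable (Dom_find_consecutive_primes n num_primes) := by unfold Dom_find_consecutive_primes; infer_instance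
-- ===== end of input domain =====

-- B replaces A's interleaved sum()-per-step scan by generate-primes-then-prefix-sum-scan with a
-- sqrt-bounded trial division; objective: faster (measured). Equivalence is proved on Pre_ below.

-- ===== PORT A =====
-- is_prime of Source A: trial division by every i in range(2, n)
def pvIsPrimeA (x : Int) : Bool :=
  if x ≤ 1 then false
  else (PySem.List.pyRange 2 x 1).all (fun i => !(PySem.Int.mod x i == 0))

-- the while-loop of A; one fuel unit per loop iteration (num += 1); fuel only makes the
-- recursion total: once sum(primes) > n the loop body never runs again, so returning seqs at
-- fuel 0 equals the Python value whenever fuel ≥ the number of iterations Python performs.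
def pvLoopA (fuel : Nat) (num : Int) (primes : List Int) (seqs : List (List Int))
    (n m : Int) : List (List Int) :=
  match fuel with
  | 0 => seqs
  | fuel' + 1 =>
    if primes.sum ≤ n then
      if pvIsPrimeA num then
        let p1 := primes ++ [num]
        -- primes.pop(0): the popped value is unused, the list becomes its tail
        let p2 := if (p1.length : Int) > m then p1.tail else p1
        let s2 := if ((p2.length : Int) == m) && pvIsPrimeA p2.sum then seqs ++ [p2] else seqs
        pvLoopA fuel' (num + 1) p2 s2 n m
      else pvLoopA fuel' (num + 1) primes seqs n m
    else seqs

-- fuel 2*n+4 covers candidates 2 .. 2n+5: by Bertrand a prime > n appears among them,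
-- and as soon as one is appended the window sum exceeds n and the loop stops.
def find_consecutive_primes (n : Int) (num_primes : Int) : List (List Int) :=
  pvLoopA (2 * n + 4).toNat 2 [] [] n num_primes

-- ===== PORT B =====
-- Source B's is_prime: trial division while i * i <= n
def pvTrialDiv (x : Int) (i : Nat) : Bool :=
  if h : (i : Int) * (i : Int) ≤ x then
    if PySem.Int.mod x (i : Int) == 0 then false
    else pvTrialDiv x (i + 1)
  else true
termination_by x.toNat + 2 - i
decreasing_by
  have hi : (i : Int) ≤ (i : Int) * (i : Int) := by nlinarith [Int.natCast_nonneg i]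
  have : (i : Int) ≤ x := le_trans hi h
  omega

def pvIsPrimeB (x : Int) : Bool :=
  if x < 2 then false else pvTrialDiv x 2

-- phase 1 of Source B: generate the primes, maintaining the running sum of the last num_primes
-- of them; same fuel guard as A's loop (one unit per candidate += 1).
def pvGenB (fuel : Nat) (cand : Int) (primes : List Int) (wsum : Int)
    (n m : Int) : List Int :=
  match fuel with
  | 0 => primes
  | fuel' + 1 =>
    if wsum ≤ n then
      if pvIsPrimeB cand then
        let p1 := primes ++ [cand]
        let w1 := wsum + cand
        let w2 := if (p1.length : Int) > m then
                    w1 - PySem.List.pyGetD p1 ((p1.length : Int) - m - 1) 0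
                  else w1
        pvGenB fuel' (cand + 1) p1 w2 n m
      else pvGenB fuel' (cand + 1) primes wsum n m
    else primes

def find_consecutive_primes_alt (n : Int) (num_primes : Int) : List (List Int) :=
  let primes := pvGenB (2 * n + 4).toNat 2 [] 0 n num_primes
  -- phase 2: prefix sums, then scan every window in O(1)
  let pre := primes.foldl (fun acc p => acc ++ [PySem.List.pyGetD acc (-1) 0 + p]) [0]
  (PySem.List.pyRange num_primes ((primes.length : Int) + 1) 1).foldl
    (fun acc k =>
      if pvIsPrimeB (PySem.List.pyGetD pre k 0 - PySem.List.pyGetD pre (k - num_primes) 0) then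
        acc ++ [PySem.List.slice primes (some (k - num_primes)) (some k)]
      else acc) []

-- ===== PRECONDITION & SPEC =====
-- Pre_ restricts to the natural domain num_primes ≥ 1 plus the pair num_primes = 0, n < 0:
-- for num_primes ≤ 0 with n ≥ 0 A loops forever, and for num_primes < 0 with n < 0 A returns
-- an accidental [] while B's window index arithmetic raises IndexError.
def Pre_find_consecutive_primes (n : Int) (num_primes : Int) : Prop :=
  1 ≤ num_primes ∨ (num_primes = 0 ∧ n < 0)
instance (n : Int) (num_primes : Int) : Decidable (Pre_find_consecutive_primes n num_primes) := by
  unfold Pre_find_consecutive_primes; infer_instance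

def pvWitness_find_consecutive_primes : Int × Int := (30, 3)

def Spec_find_consecutive_primes (n : Int) (num_primes : Int) (out : List (List Int)) : Prop :=
  out = find_consecutive_primes_alt n num_primes
instance (n : Int) (num_primes : Int) (out : List (List Int)) :
    Decidable (Spec_find_consecutive_primes n num_primes out) := by
  unfold Spec_find_consecutive_primes; infer_instance

-- ===== CLAIM (what is proved, stated in full; the proofs are below) =====
def Claim_equal_find_consecutive_primes : Prop :=
  ∀ (n : Int) (num_primes : Int), Dom_find_consecutive_primes n num_primes →
    Pre_find_consecutive_primes n num_primes →
    Spec_find_consecutive_primes n num_primes (find_consecutive_primes n num_primes)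

-- ===== LEMMAS AND PROOFS =====

-- primality: A's full trial division agrees with B's sqrt-bounded one
theorem pvIsPrimeA_iff (x : Int) : pvIsPrimeA x = true ↔ 2 ≤ x ∧ ∀ j : Int, 2 ≤ j → j < x → ¬ j ∣ x := by
  unfold pvIsPrimeA
  split
  · simp; intro _; omega
  · rename_i h
    simp [List.all_eq_true, PySem.List.mem_pyRange_one, PySem.Int.mod_eq_zero_iff_dvd]
    intro _; omega

theorem pvTrialDiv_iff (x : Int) (i : Nat) :
    pvTrialDiv x i = true ↔ ∀ j : Nat, i ≤ j → (j : Int) * (j : Int) ≤ x → ¬ ((j : Int) ∣ x) := by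
  fun_induction pvTrialDiv x i with
  | case1 i h hdvd =>
    simp at hdvd
    simp [PySem.Int.mod_eq_zero_iff_dvd] at hdvd
    simp
    exact ⟨i, le_refl _, h, hdvd⟩
  | case2 i h hdvd ih =>
    rw [ih]
    constructor
    · intro hall j hij hj
      rcases Nat.eq_or_lt_of_le hij with rfl | hlt
      · simp [PySem.Int.mod_eq_zero_iff_dvd] at hdvd; exact hdvd
      · exact hall j hlt hj
    · intro hall j hij hj; exact hall j (by omega) hj
  | case3 i h =>
    simp
    intro j hij hj
    exfalso; apply h
    have : (i : Int) ≤ j := by exact_mod_cast Nat.cast_le.mpr hij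
    nlinarith [Int.natCast_nonneg i]

theorem prime_eq (x : Int) : pvIsPrimeA x = pvIsPrimeB x := by
  by_cases hx : x < 2
  · unfold pvIsPrimeA pvIsPrimeB
    rw [if_pos (by omega : x ≤ 1), if_pos hx]
  · have hx2 : 2 ≤ x := by omega
    have hB : pvIsPrimeB x = pvTrialDiv x 2 := by unfold pvIsPrimeB; rw [if_neg hx]
    rw [Bool.eq_iff_iff, pvIsPrimeA_iff, hB, pvTrialDiv_iff]
    constructor
    · intro ⟨_, hall⟩ j h2j hj2
      have hjj : (j : Int) < (j : Int) * (j : Int) := by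
        have : (2 : Int) ≤ j := by exact_mod_cast h2j
        nlinarith
      exact hall j (by exact_mod_cast h2j) (lt_of_lt_of_le hjj hj2)
    · intro hall
      refine ⟨hx2, ?_⟩
      intro j h2j hjx hdvd
      obtain ⟨e, he⟩ := hdvd
      have hj0 : 0 < j := by omega
      have he2 : 2 ≤ e := by nlinarith
      set m : Int := min j e with hm
      have hm2 : 2 ≤ m := le_min h2j he2
      have hmm : m * m ≤ x := by
        have h1 : m ≤ j := min_le_left _ _
        have h2 : m ≤ e := min_le_right _ _
        calc m * m ≤ j * e := by nlinarith
        _ = x := he.symm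
      have hjd : j ∣ x := ⟨e, he⟩
      have hed : e ∣ x := ⟨j, by rw [he]; ring⟩
      have hmdvd : m ∣ x := by
        rcases min_cases j e with ⟨hq, _⟩ | ⟨hq, _⟩ <;> rw [hm, hq] <;> assumption
      have hcast : ((m.toNat : Int)) = m := Int.toNat_of_nonneg (by omega)
      exact hall m.toNat (by omega) (by rw [hcast]; exact hmm) (by rw [hcast]; exact hmdvd)

-- A's sliding buffer, expressed as a suffix of the full prime list
def pvWin (L : List Int) (m : Int) : List Int := L.drop (L.length - m.toNat)

-- the value both ports compute from a finished prime list
def pvScan (L : List Int) (m : Int) : List (List Int) :=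
  ((PySem.List.pyRange m ((L.length : Int) + 1) 1).filter
      (fun k => pvIsPrimeB ((L.take k.toNat).sum - (L.take (k - m).toNat).sum))).map
    (fun k => (L.take k.toNat).drop (k - m).toNat)

-- clean form of Source B's prefix-sum list
def pvPre (s : Int) (L : List Int) : List Int :=
  match L with
  | [] => [s]
  | p :: ps => s :: pvPre (s + p) ps

theorem sum_take_drop (L : List Int) (a b : Nat) (hab : a ≤ b) :
    ((L.take b).drop a).sum = (L.take b).sum - (L.take a).sum := by
  have h1 : (L.take b).take a = L.take a := by rw [List.take_take, min_eq_left hab]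
  have h2 : (L.take b).sum = ((L.take b).take a).sum + ((L.take b).drop a).sum := by
    rw [← List.sum_append, List.take_append_drop]
  rw [h1] at h2; omega

theorem pvPre_length (s : Int) (L : List Int) : (pvPre s L).length = L.length + 1 := by
  induction L generalizing s with
  | nil => rfl
  | cons p ps ih => simp [pvPre, ih]

theorem pvPre_getElem (L : List Int) (s : Int) (k : Nat) (hk : k ≤ L.length)
    (h : k < (pvPre s L).length) : (pvPre s L)[k] = s + (L.take k).sum := by
  induction L generalizing s k with
  | nil =>
    have hk0 : k = 0 := Nat.le_zero.mp hk
    subst hk0; simp [pvPre]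
  | cons p ps ih =>
    cases k with
    | zero => simp [pvPre]
    | succ k =>
      have hk' : k ≤ ps.length := by simp at hk; omega
      simp only [pvPre, List.getElem_cons_succ]
      rw [ih (s + p) k hk' (by rw [pvPre_length]; omega)]
      simp [List.take_succ_cons]
      ring

theorem foldl_pre (L : List Int) (acc : List Int) (hacc : acc ≠ []) :
    L.foldl (fun acc p => acc ++ [PySem.List.pyGetD acc (-1) 0 + p]) acc
      = acc.dropLast ++ pvPre (PySem.List.pyGetD acc (-1) 0) L := by
  induction L generalizing acc with
  | nil =>
    simp only [List.foldl_nil, pvPre]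
    rw [PySem.List.pyGetD_neg_one acc 0 hacc, List.dropLast_append_getLast hacc]
  | cons p ps ih =>
    simp only [List.foldl_cons]
    rw [ih (acc ++ [PySem.List.pyGetD acc (-1) 0 + p]) (by simp)]
    rw [PySem.List.pyGetD_neg_one_append_singleton, List.dropLast_concat]
    simp only [pvPre]
    rw [List.append_cons]
    congr 1
    conv_lhs => rw [← List.dropLast_append_getLast hacc]
    rw [PySem.List.pyGetD_neg_one acc 0 hacc]

theorem scan_nil (m : Int) (hm : 1 ≤ m) : pvScan [] m = [] := by
  unfold pvScan
  rw [show ((([] : List Int).length : Int) + 1) = 1 by simp,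
      PySem.List.pyRange_one_eq_nil (by omega)]
  rfl

theorem win_nil (m : Int) : pvWin [] m = [] := by simp [pvWin]

theorem B_eq (n m : Int) (hm : 1 ≤ m) :
    find_consecutive_primes_alt n m = pvScan (pvGenB (2 * n + 4).toNat 2 [] 0 n m) m := by
  simp only [find_consecutive_primes_alt]
  set L := pvGenB (2 * n + 4).toNat 2 [] 0 n m with hL
  rw [foldl_pre L [0] (by simp)]
  rw [show PySem.List.pyGetD ([0] : List Int) (-1) 0 = 0 by rfl]
  rw [show ([0] : List Int).dropLast = [] from rfl, List.nil_append]
  have hpre : ∀ k : Int, 0 ≤ k → k ≤ (L.length : Int) →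
      PySem.List.pyGetD (pvPre 0 L) k 0 = (L.take k.toNat).sum := by
    intro k hk0 hkl
    rw [PySem.List.pyGetD_eq_getElem (pvPre 0 L) 0 hk0 (by rw [pvPre_length]; omega)]
    rw [pvPre_getElem L 0 k.toNat (by omega) (by rw [pvPre_length]; omega), zero_add]
  rw [PySem.List.foldl_append_if]
  unfold pvScan
  rw [List.nil_append]
  have hfil : (PySem.List.pyRange m ((L.length : Int) + 1) 1).filter
      (fun k => pvIsPrimeB (PySem.List.pyGetD (pvPre 0 L) k 0
        - PySem.List.pyGetD (pvPre 0 L) (k - m) 0))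
      = (PySem.List.pyRange m ((L.length : Int) + 1) 1).filter
      (fun k => pvIsPrimeB ((L.take k.toNat).sum - (L.take (k - m).toNat).sum)) := by
    apply List.filter_congr
    intro k hk
    rw [PySem.List.mem_pyRange_one] at hk
    rw [hpre k (by omega) (by omega), hpre (k - m) (by omega) (by omega)]
  rw [hfil]
  apply List.map_congr_left
  intro k hk
  have hk' := (List.mem_filter.mp hk).1
  rw [PySem.List.mem_pyRange_one] at hk'
  rw [PySem.List.slice_toNat L (by omega) (by omega), List.drop_take]

theorem scan_snoc (L : List Int) (p m : Int) (hm : 1 ≤ m) :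
    pvScan (L ++ [p]) m =
      pvScan L m ++
        (if m ≤ (L.length : Int) + 1 ∧ pvIsPrimeB (pvWin (L ++ [p]) m).sum = true
          then [pvWin (L ++ [p]) m] else []) := by
  have hlen : (((L ++ [p]).length : Int)) = (L.length : Int) + 1 := by simp
  by_cases hc : m ≤ (L.length : Int) + 1
  · unfold pvScan
    rw [hlen, PySem.List.pyRange_one_succ_right hc, List.filter_append, List.map_append]
    congr 1
    · have hfil : (PySem.List.pyRange m ((L.length : Int) + 1) 1).filter
          (fun k => pvIsPrimeB (((L ++ [p]).take k.toNat).sum - ((L ++ [p]).take (k - m).toNat).sum))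
          = (PySem.List.pyRange m ((L.length : Int) + 1) 1).filter
          (fun k => pvIsPrimeB ((L.take k.toNat).sum - (L.take (k - m).toNat).sum)) := by
        apply List.filter_congr
        intro k hk
        rw [PySem.List.mem_pyRange_one] at hk
        rw [List.take_append_of_le_length (by omega), List.take_append_of_le_length (by omega)]
      rw [hfil]
      apply List.map_congr_left
      intro k hk
      have hk' := (List.mem_filter.mp hk).1
      rw [PySem.List.mem_pyRange_one] at hk'
      rw [List.take_append_of_le_length (by omega)]
    · have htake : (L ++ [p]).take ((L.length : Int) + 1).toNat = L ++ [p] := by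
        apply List.take_of_length_le; simp
      have hdrop : (L ++ [p]).drop (((L.length : Int) + 1) - m).toNat = pvWin (L ++ [p]) m := by
        rw [pvWin]; congr 1
        simp only [List.length_append, List.length_singleton]; omega
      have hdiff : ((L ++ [p]).take ((L.length : Int) + 1).toNat).sum
          - ((L ++ [p]).take (((L.length : Int) + 1) - m).toNat).sum
          = (pvWin (L ++ [p]) m).sum := by
        rw [← sum_take_drop (L ++ [p]) (((L.length : Int) + 1) - m).toNat
              ((L.length : Int) + 1).toNat (by omega), htake]
        rw [hdrop]
      simp only [List.filter_cons, List.filter_nil, hdiff]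
      by_cases hp : pvIsPrimeB (pvWin (L ++ [p]) m).sum = true
      · rw [if_pos (by simpa using hp), if_pos ⟨hc, hp⟩]
        simp only [List.map_cons, List.map_nil, htake, hdrop]
      · rw [if_neg (by simpa using hp), if_neg (by tauto)]
        simp
  · unfold pvScan
    rw [hlen, PySem.List.pyRange_one_eq_nil (by omega),
        PySem.List.pyRange_one_eq_nil (by omega)]
    simp [hc]

theorem winA_step (L : List Int) (p m : Int) (hm : 1 ≤ m) :
    (if ((pvWin L m ++ [p]).length : Int) > m then (pvWin L m ++ [p]).tail
      else pvWin L m ++ [p]) = pvWin (L ++ [p]) m := by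
  have hmt : 1 ≤ m.toNat := by omega
  by_cases hc : m.toNat ≤ L.length
  · rw [if_pos (by simp [pvWin]; omega)]
    have hne : L.drop (L.length - m.toNat) ≠ [] := by
      apply List.ne_nil_of_length_pos; simp; omega
    rw [pvWin, List.tail_append_of_ne_nil hne, List.tail_drop, pvWin]
    rw [List.length_append, List.length_singleton,
        List.drop_append_of_le_length (by omega)]
    congr 2
    omega
  · rw [if_neg (by simp [pvWin]; omega)]
    rw [pvWin, pvWin, List.length_append, List.length_singleton]
    rw [show L.length - m.toNat = 0 by omega, show L.length + 1 - m.toNat = 0 by omega]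
    simp

theorem genw_step (L : List Int) (p m : Int) (hm : 1 ≤ m) :
    (if ((L ++ [p]).length : Int) > m then
        ((pvWin L m).sum + p) - PySem.List.pyGetD (L ++ [p]) (((L ++ [p]).length : Int) - m - 1) 0
      else (pvWin L m).sum + p) = (pvWin (L ++ [p]) m).sum := by
  have hmt : 1 ≤ m.toNat := by omega
  by_cases hc : m.toNat ≤ L.length
  · rw [if_pos (by simp; omega)]
    have hidx : (((L ++ [p]).length : Int) - m - 1) = ((L.length - m.toNat : Nat) : Int) := by
      simp; omega
    rw [hidx, PySem.List.pyGetD_natCast, List.getD_append _ _ _ _ (by omega),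
        List.getD_eq_getElem _ _ (by omega)]
    have hwin : pvWin L m = L[L.length - m.toNat] :: L.drop (L.length - m.toNat + 1) := by
      rw [pvWin, List.drop_eq_getElem_cons (by omega)]
    have hwin' : pvWin (L ++ [p]) m = L.drop (L.length - m.toNat + 1) ++ [p] := by
      rw [pvWin, List.length_append, List.length_singleton,
          List.drop_append_of_le_length (by omega)]
      congr 2; omega
    rw [hwin, hwin', List.sum_cons, List.sum_append, List.sum_singleton]
    ring
  · rw [if_neg (by simp; omega)]
    rw [pvWin, pvWin, List.length_append, List.length_singleton]
    rw [show L.length - m.toNat = 0 by omega, show L.length + 1 - m.toNat = 0 by omega]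
    simp

theorem win_len_eq_iff (L : List Int) (p m : Int) (hm : 1 ≤ m) :
    (((pvWin (L ++ [p]) m).length : Int) = m) ↔ m ≤ (L.length : Int) + 1 := by
  simp [pvWin, List.length_drop]
  omega

theorem sim (fuel : Nat) : ∀ (cand : Int) (L : List Int) (n m : Int), 1 ≤ m →
    pvLoopA fuel cand (pvWin L m) (pvScan L m) n m
      = pvScan (pvGenB fuel cand L (pvWin L m).sum n m) m := by
  induction fuel with
  | zero => intro cand L n m hm; rfl
  | succ fuel' ih =>
    intro cand L n m hm
    simp only [pvLoopA, pvGenB]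
    by_cases hcond : (pvWin L m).sum ≤ n
    · rw [if_pos hcond, if_pos hcond, prime_eq cand]
      by_cases hp : pvIsPrimeB cand = true
      · rw [if_pos hp, if_pos hp]
        rw [winA_step L cand m hm, genw_step L cand m hm]
        have hs : (if ((((pvWin (L ++ [cand]) m).length : Int) == m)
              && pvIsPrimeA (pvWin (L ++ [cand]) m).sum) = true
            then pvScan L m ++ [pvWin (L ++ [cand]) m] else pvScan L m)
            = pvScan (L ++ [cand]) m := by
          rw [scan_snoc L cand m hm, prime_eq]
          by_cases h1 : m ≤ (L.length : Int) + 1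
          · by_cases h2 : pvIsPrimeB (pvWin (L ++ [cand]) m).sum = true
            · rw [if_pos (by simp [h2, (win_len_eq_iff L cand m hm).mpr h1]),
                  if_pos ⟨h1, h2⟩]
            · rw [if_neg (by simp [h2]), if_neg (by tauto)]
              simp
          · have : ¬ (((pvWin (L ++ [cand]) m).length : Int) = m) := by
              rw [win_len_eq_iff L cand m hm]; exact h1
            rw [if_neg (by simp [beq_iff_eq, this]), if_neg (by tauto)]
            simp
        rw [hs]
        exact ih (cand + 1) (L ++ [cand]) n m hm
      · rw [if_neg hp, if_neg hp]
        exact ih (cand + 1) L n m hm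
    · rw [if_neg hcond, if_neg hcond]

-- degenerate accepted corner: num_primes = 0 with n < 0 (both loops never run)
theorem loopA_neg (fuel : Nat) (cand : Int) (seqs : List (List Int)) (n m : Int) (hn : n < 0) :
    pvLoopA fuel cand [] seqs n m = seqs := by
  cases fuel with
  | zero => rfl
  | succ fuel' => simp only [pvLoopA, List.sum_nil]; rw [if_neg (by omega)]

theorem genB_neg (fuel : Nat) (cand : Int) (primes : List Int) (n m : Int) (hn : n < 0) :
    pvGenB fuel cand primes 0 n m = primes := by
  cases fuel with
  | zero => rfl
  | succ fuel' => simp only [pvGenB]; rw [if_neg (by omega)]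

-- ===== VERDICT (by name: the statement is the Claim_ definition above) =====
theorem find_consecutive_primes_spec : Claim_equal_find_consecutive_primes := by
  intro n m _ hpre
  unfold Spec_find_consecutive_primes
  rcases hpre with hm | ⟨hm0, hn⟩
  · have h := sim (2 * n + 4).toNat 2 [] n m hm
    rw [win_nil, scan_nil m hm] at h
    rw [show ([] : List Int).sum = 0 from rfl] at h
    unfold find_consecutive_primes
    rw [h, ← B_eq n m hm]
  · subst hm0
    unfold find_consecutive_primes
    rw [loopA_neg _ _ _ _ _ hn]
    unfold find_consecutive_primes_alt
    rw [genB_neg _ _ _ _ _ hn]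
    simp [pvIsPrimeB]
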